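-- pv_equiv track=rewrite | github.com/Pipatooa/ppps | launcher.py | specialMerge
-- ===== SOURCE A (Python) =====
-- def specialMerge(x, y):
--     def mergeDicts(x, y):
--         z = x.copy()
--         z.update(y)
--         return z
--
--     z = {}
--
--     for key in mergeDicts(x, y):
--         if key in x and key in y:
--             z[key] = x[key]
--             z[key].update(y[key])
--         elif key in x:
--             z[key] = x[key]
--         elif key in y:
--             z[key] = y[key]
--
--     return z
-- ===== SOURCE B (Python) =====
-- def specialMerge(x, y):
--     # copy pass over x (preserving references), then one pass over y:
--     # shared inner dicts are mutated in place via .update, new keys appended.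
--     z = {}
--     for key in x:
--         z[key] = x[key]
--     for key, inner in y.items():
--         if key in z:
--             z[key].update(inner)
--         else:
--             z[key] = inner
--     return z
-- ===== Notes on version B (the rewrite author's own statement) =====
-- stated objective: simpler
-- what changed: Replaces the union-dict construction (mergeDicts) and the three-way key-membership branch with two plain sequential passes: copy x into z, then fold y in, updating shared inner dicts in place; same output order and same in-place mutation of x's inner dicts.
import Mathlib
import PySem

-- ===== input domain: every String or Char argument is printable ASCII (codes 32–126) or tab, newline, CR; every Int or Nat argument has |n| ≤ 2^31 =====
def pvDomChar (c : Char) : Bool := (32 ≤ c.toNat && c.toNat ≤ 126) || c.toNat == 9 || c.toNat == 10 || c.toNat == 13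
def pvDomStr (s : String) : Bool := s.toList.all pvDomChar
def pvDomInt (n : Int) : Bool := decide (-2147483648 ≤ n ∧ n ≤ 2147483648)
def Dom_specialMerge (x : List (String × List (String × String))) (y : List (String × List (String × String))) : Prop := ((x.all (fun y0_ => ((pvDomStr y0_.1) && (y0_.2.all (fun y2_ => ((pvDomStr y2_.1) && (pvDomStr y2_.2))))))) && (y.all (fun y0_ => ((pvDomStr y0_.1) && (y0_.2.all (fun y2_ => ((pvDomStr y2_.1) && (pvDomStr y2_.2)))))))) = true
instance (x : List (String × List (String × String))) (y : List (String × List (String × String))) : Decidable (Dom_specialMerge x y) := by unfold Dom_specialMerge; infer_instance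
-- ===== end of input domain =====

-- B replaces A's union-dict (mergeDicts) plus three-way membership branch with two plain
-- sequential passes (copy x, then fold y in): simpler, same return value. Both A and B mutate
-- x's shared inner dicts in place via dict.update in the same way; the theorems are about the
-- return value.


-- ===== PORT A =====
-- a.update(b) on inner dicts (exact: PySem.Dict.update is Python dict.update)
def pvUpd (a b : List (String × String)) : List (String × String) :=
  ((PySem.Dict.mk a).update b).items

def specialMerge (x : List (String × List (String × String))) (y : List (String × List (String × String))) : List (String × List (String × String)) :=
  -- mergeDicts(x, y): z = x.copy(); z.update(y); return z
  let merged := (PySem.Dict.mk x).update y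
  -- z = {}; for key in mergeDicts(x, y): …
  let z := merged.keys.foldl
    (fun (z : PySem.Dict String (List (String × String))) key =>
      if (PySem.Dict.mk x).contains key && (PySem.Dict.mk y).contains key then
        -- z[key] = x[key]; z[key].update(y[key])  (two statements, the second mutates the stored dict)
        let z := z.insert key (((PySem.Dict.mk x).get? key).getD [])
        z.insert key (pvUpd ((z.get? key).getD []) (((PySem.Dict.mk y).get? key).getD []))
      else if (PySem.Dict.mk x).contains key then
        z.insert key (((PySem.Dict.mk x).get? key).getD [])
      else if (PySem.Dict.mk y).contains key then
        z.insert key (((PySem.Dict.mk y).get? key).getD [])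
      else z)
    PySem.Dict.empty
  z.items

-- ===== PORT B =====
def specialMerge_alt (x : List (String × List (String × String))) (y : List (String × List (String × String))) : List (String × List (String × String)) :=
  -- z = {}; for key in x: z[key] = x[key]
  let z := x.foldl (fun (z : PySem.Dict String (List (String × String))) kv => z.insert kv.1 kv.2) PySem.Dict.empty
  -- for key, inner in y.items(): if key in z: z[key].update(inner) else: z[key] = inner
  let z := y.foldl
    (fun (z : PySem.Dict String (List (String × String))) kv =>
      if z.contains kv.1 then
        z.insert kv.1 (pvUpd ((z.get? kv.1).getD []) kv.2)
      else
        z.insert kv.1 kv.2)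
    z
  z.items

-- ===== PRECONDITION & SPEC =====
-- Pre_ excludes association lists carrying a duplicate key (in the outer dicts or in any inner
-- dict): a Python dict cannot carry duplicates, so such lists have no faithful dict reading.
def Pre_specialMerge (x : List (String × List (String × String))) (y : List (String × List (String × String))) : Prop :=
  (x.map Prod.fst).Nodup ∧ (∀ p ∈ x, (p.2.map Prod.fst).Nodup) ∧
  (y.map Prod.fst).Nodup ∧ (∀ p ∈ y, (p.2.map Prod.fst).Nodup)
instance (x : List (String × List (String × String))) (y : List (String × List (String × String))) : Decidable (Pre_specialMerge x y) := by unfold Pre_specialMerge; infer_instance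

def pvWitness_specialMerge : (List (String × List (String × String))) × (List (String × List (String × String))) :=
  ([("a", [("p", "1")]), ("b", [])], [("a", [("p", "2"), ("q", "3")]), ("c", [("r", "4")])])

def Spec_specialMerge (x : List (String × List (String × String))) (y : List (String × List (String × String))) (out : List (String × List (String × String))) : Prop := out = specialMerge_alt x y
instance (x : List (String × List (String × String))) (y : List (String × List (String × String))) (out : List (String × List (String × String))) : Decidable (Spec_specialMerge x y out) := by unfold Spec_specialMerge; infer_instance

-- ===== CLAIM (what is proved, stated in full; the proofs are below) =====
def Claim_equal_specialMerge : Prop := ∀ (x : List (String × List (String × String))) (y : List (String × List (String × String))), Dom_specialMerge x y → Pre_specialMerge x y → Spec_specialMerge x y (specialMerge x y)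

-- ===== LEMMAS AND PROOFS =====

-- canonical common value both ports reach (proof-only definitions)
def pvApplyY (yd : PySem.Dict String (List (String × String))) (p : String × List (String × String)) : String × List (String × String) :=
  match yd.get? p.1 with
  | some b => (p.1, pvUpd p.2 b)
  | none => p

def pvCanon (x y : List (String × List (String × String))) : List (String × List (String × String)) :=
  x.map (pvApplyY (PySem.Dict.mk y)) ++ y.filter (fun q => !((PySem.Dict.mk x).contains q.1))

-- the value A's loop stores at key k
def pvG (x y : List (String × List (String × String))) (k : String) : List (String × String) :=
  if (PySem.Dict.mk x).contains k && (PySem.Dict.mk y).contains k then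
    pvUpd (((PySem.Dict.mk x).get? k).getD []) (((PySem.Dict.mk y).get? k).getD [])
  else if (PySem.Dict.mk x).contains k then ((PySem.Dict.mk x).get? k).getD []
  else ((PySem.Dict.mk y).get? k).getD []

theorem pv_get?_none {ν : Type} (d : PySem.Dict String ν) (k : String) (h : k ∉ d.keys) : d.get? k = none :=
  (PySem.Dict.get?_eq_none_iff_not_mem_keys d k).mpr h

theorem pv_contains_false {ν : Type} (d : PySem.Dict String ν) (k : String) (h : k ∉ d.keys) : d.contains k = false := by
  cases hc : d.contains k
  · rfl
  · exact absurd ((PySem.Dict.contains_iff_mem_keys d k).mp hc) h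

theorem pv_filter_map_fst {α β : Type} (p : α → Bool) (l : List (α × β)) :
    (l.map Prod.fst).filter p = (l.filter (fun q => p q.1)).map Prod.fst := by
  induction l with
  | nil => rfl
  | cons a t ih => by_cases h : p a.1 <;> simp [h, ih]

-- B's second loop, generalized over the accumulator
theorem pvBfold (y : List (String × List (String × String))) :
    ∀ (d : PySem.Dict String (List (String × String))), d.keys.Nodup → (y.map Prod.fst).Nodup →
    (y.foldl
      (fun (z : PySem.Dict String (List (String × String))) kv =>
        if z.contains kv.1 then
          z.insert kv.1 (pvUpd ((z.get? kv.1).getD []) kv.2)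
        else
          z.insert kv.1 kv.2) d).items
      = d.items.map (pvApplyY (PySem.Dict.mk y)) ++ y.filter (fun q => !(d.contains q.1)) := by
  induction y with
  | nil =>
    intro d _ _
    rw [show List.map (pvApplyY (PySem.Dict.mk [])) d.items = List.map id d.items from
      List.map_congr_left (fun p _ => rfl), List.map_id]
    simp
  | cons kb t ih =>
    intro d hd hnd
    obtain ⟨k, b⟩ := kb
    simp only [List.map_cons, List.nodup_cons] at hnd
    obtain ⟨hkt, hndt⟩ := hnd
    have hgtk : (PySem.Dict.mk t).get? k = none := pv_get?_none _ _ (by simpa [PySem.Dict.keys_mk] using hkt)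
    have hne : ∀ q ∈ t, (q : String × List (String × String)).1 ≠ k := by
      intro q hq hqe
      exact hkt (hqe ▸ List.mem_map_of_mem hq)
    have happly : ∀ p : String × List (String × String), p.1 ≠ k →
        pvApplyY (PySem.Dict.mk ((k, b) :: t)) p = pvApplyY (PySem.Dict.mk t) p := by
      intro p hp
      unfold pvApplyY
      rw [show (PySem.Dict.mk ((k, b) :: t)).get? p.1 = (PySem.Dict.mk t).get? p.1 by
        rw [PySem.Dict.get?_mk_cons]
        simp [Ne.symm hp]]
    cases hc : d.contains k
    · -- key not yet present: append
      have hitems : (d.insert k b).items = d.items ++ [(k, b)] := PySem.Dict.items_insert_of_not_contains d b hc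
      have hkeysnd : (d.insert k b).keys.Nodup := PySem.Dict.nodup_keys_insert d k b hd
      have hknotin : k ∉ d.keys := fun hmem => by
        rw [(PySem.Dict.contains_iff_mem_keys d k).mpr hmem] at hc; cases hc
      simp only [List.foldl_cons, hc, Bool.false_eq_true, if_false]
      rw [ih (d.insert k b) hkeysnd hndt, hitems]
      have hfil : t.filter (fun q => !((d.insert k b).contains q.1))
          = t.filter (fun q => !(d.contains q.1)) := by
        apply List.filter_congr
        intro q hq
        rw [PySem.Dict.contains_insert]
        simp [hne q hq]
      have hmap : ∀ p ∈ d.items, pvApplyY (PySem.Dict.mk t) p = pvApplyY (PySem.Dict.mk ((k, b) :: t)) p := by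
        intro p hp
        have : p.1 ≠ k := by
          intro hpe
          exact hknotin (hpe ▸ List.mem_map_of_mem hp)
        exact (happly p this).symm
      have hkb : pvApplyY (PySem.Dict.mk t) (k, b) = (k, b) := by
        unfold pvApplyY; rw [hgtk]
      rw [List.map_append, List.map_congr_left hmap, hfil]
      simp [hkb, hc]
    · -- key present: overwrite in place
      have hmem : k ∈ d.keys := (PySem.Dict.contains_iff_mem_keys d k).mp hc
      cases hg : d.get? k with
      | none => exact absurd ((PySem.Dict.get?_eq_none_iff_not_mem_keys d k).mp hg) (fun h => h hmem)
      | some a =>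
        have hkeysnd : (d.insert k (pvUpd a b)).keys.Nodup := PySem.Dict.nodup_keys_insert d k _ hd
        simp only [List.foldl_cons, hc, if_true, hg, Option.getD_some]
        rw [ih (d.insert k (pvUpd a b)) hkeysnd hndt]
        rw [PySem.Dict.items_insert_of_contains d (pvUpd a b) hc]
        have hfil : t.filter (fun q => !((d.insert k (pvUpd a b)).contains q.1))
            = t.filter (fun q => !(d.contains q.1)) := by
          apply List.filter_congr
          intro q hq
          rw [PySem.Dict.contains_insert]
          simp [hne q hq]
        have hmap : ∀ p ∈ d.items,
            pvApplyY (PySem.Dict.mk t) (if (p.1 == k) = true then (k, pvUpd a b) else p)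
              = pvApplyY (PySem.Dict.mk ((k, b) :: t)) p := by
          intro p hp
          by_cases hpk : p.1 = k
          · have hpa : p.2 = a := by
              have hpm : (k, p.2) ∈ d.items := by
                have : p = (k, p.2) := by rw [← hpk]
                exact this ▸ hp
              have := PySem.Dict.get?_of_mem_items d hpm hd
              rw [hg] at this
              exact (Option.some.injEq _ _ ▸ this).symm
            rw [if_pos (by simp [hpk])]
            unfold pvApplyY
            rw [hgtk, PySem.Dict.get?_mk_cons]
            simp [hpk, hpa]
          · rw [if_neg (by simp [hpk])]
            exact (happly p hpk).symm
        rw [List.map_map, List.map_congr_left (by intro p hp; exact hmap p hp), hfil]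
        simp [hc]

-- A's loop over distinct fresh keys appends (k, pvG x y k) for each key present in x or y
theorem pvAfold (x y : List (String × List (String × String))) (ks : List String) :
    ∀ (z : PySem.Dict String (List (String × String))), ks.Nodup →
    (∀ k ∈ ks, z.contains k = false) →
    (∀ k ∈ ks, ((PySem.Dict.mk x).contains k || (PySem.Dict.mk y).contains k) = true) →
    (ks.foldl
      (fun (z : PySem.Dict String (List (String × String))) key =>
        if (PySem.Dict.mk x).contains key && (PySem.Dict.mk y).contains key then
          let z := z.insert key (((PySem.Dict.mk x).get? key).getD [])
          z.insert key (pvUpd ((z.get? key).getD []) (((PySem.Dict.mk y).get? key).getD []))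
        else if (PySem.Dict.mk x).contains key then
          z.insert key (((PySem.Dict.mk x).get? key).getD [])
        else if (PySem.Dict.mk y).contains key then
          z.insert key (((PySem.Dict.mk y).get? key).getD [])
        else z) z).items
      = z.items ++ ks.map (fun k => (k, pvG x y k)) := by
  induction ks with
  | nil => intro z _ _ _; simp
  | cons k t ih =>
    intro z hnd hz hxy
    simp only [List.nodup_cons] at hnd
    obtain ⟨hkt, hndt⟩ := hnd
    have hzk : z.contains k = false := hz k (List.mem_cons_self ..)
    have hstep : ∀ (w : List (String × String)),
        ((z.insert k w).items = z.items ++ [(k, w)]) := fun w =>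
      PySem.Dict.items_insert_of_not_contains z w hzk
    have hcont : ∀ (w : List (String × String)), ∀ k' ∈ t, (z.insert k w).contains k' = false := by
      intro w k' hk'
      rw [PySem.Dict.contains_insert]
      have : k' ≠ k := fun h => hkt (h ▸ hk')
      simp [this, hz k' (List.mem_cons_of_mem _ hk')]
    -- the step stores exactly (k, pvG x y k)
    have hone : (fun (z : PySem.Dict String (List (String × String))) key =>
        if (PySem.Dict.mk x).contains key && (PySem.Dict.mk y).contains key then
          let z := z.insert key (((PySem.Dict.mk x).get? key).getD [])
          z.insert key (pvUpd ((z.get? key).getD []) (((PySem.Dict.mk y).get? key).getD []))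
        else if (PySem.Dict.mk x).contains key then
          z.insert key (((PySem.Dict.mk x).get? key).getD [])
        else if (PySem.Dict.mk y).contains key then
          z.insert key (((PySem.Dict.mk y).get? key).getD [])
        else z) z k = z.insert k (pvG x y k) := by
      cases hcx : (PySem.Dict.mk x).contains k <;> cases hcy : (PySem.Dict.mk y).contains k
      · have h := hxy k (List.mem_cons_self ..)
        rw [hcx, hcy] at h
        cases h
      · simp [pvG, hcx, hcy]
      · simp [pvG, hcx, hcy]
      · simp [pvG, hcx, hcy, PySem.Dict.get?_insert_self, PySem.Dict.insert_insert_self]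
    simp only [List.foldl_cons, hone]
    rw [ih (z.insert k (pvG x y k)) hndt (hcont _) (fun k' hk' => hxy k' (List.mem_cons_of_mem _ hk')),
      hstep]
    simp

theorem pv_mk_get?_mem (l : List (String × List (String × String)))
    (hnd : (l.map Prod.fst).Nodup) (p : String × List (String × String)) (hp : p ∈ l) :
    (PySem.Dict.mk l).get? p.1 = some p.2 := by
  apply PySem.Dict.get?_of_mem_items
  · exact hp
  · simpa [PySem.Dict.keys_mk] using hnd

theorem pv_mk_contains_of_mem (l : List (String × List (String × String)))
    (p : String × List (String × String)) (hp : p ∈ l) :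
    (PySem.Dict.mk l).contains p.1 = true := by
  apply (PySem.Dict.contains_iff_mem_keys _ _).mpr
  rw [PySem.Dict.keys_mk]
  exact List.mem_map_of_mem hp

theorem specialMerge_B_eq_canon : ∀ (x y : List (String × List (String × String))), Pre_specialMerge x y → specialMerge_alt x y = pvCanon x y := by
  intro x y hpre
  obtain ⟨hx, _, hy, _⟩ := hpre
  have h0 : (x.foldl (fun (z : PySem.Dict String (List (String × String))) kv => z.insert kv.1 kv.2) PySem.Dict.empty) = PySem.Dict.mk x := by
    apply PySem.Dict.ext
    rw [PySem.Dict.items_foldl_insert_fresh x Prod.fst Prod.snd PySem.Dict.empty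
      (fun a _ => PySem.Dict.contains_empty _) hx]
    simp [PySem.Dict.empty]
  simp only [specialMerge_alt]
  rw [h0, pvBfold y (PySem.Dict.mk x) (by simpa [PySem.Dict.keys_mk] using hx) hy]
  rfl

theorem specialMerge_A_eq_canon : ∀ (x y : List (String × List (String × String))), Pre_specialMerge x y → specialMerge x y = pvCanon x y := by
  intro x y hpre
  obtain ⟨hx, _, hy, _⟩ := hpre
  have hxk : (PySem.Dict.mk x).keys.Nodup := by simpa [PySem.Dict.keys_mk] using hx
  have hkeys : ((PySem.Dict.mk x).update y).keys
      = (x.map Prod.fst) ++ (y.map Prod.fst).filter (fun a => !(PySem.Set.contains (x.map Prod.fst) a)) := by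
    have h1 : ((PySem.Dict.mk x).update y).keys = PySem.Set.update (PySem.Dict.mk x).keys (y.map Prod.fst) :=
      PySem.Dict.keys_foldl_insert_key y Prod.fst (fun _ p => p.2) (PySem.Dict.mk x)
    rw [h1, PySem.Set.update_eq_append_filter, PySem.Set.ofList_eq_self_of_nodup _ hy]
    simp [PySem.Dict.keys_mk]
  have hksnd : ((PySem.Dict.mk x).update y).keys.Nodup := PySem.Dict.nodup_keys_update _ y hxk
  have hxory : ∀ k ∈ ((PySem.Dict.mk x).update y).keys,
      ((PySem.Dict.mk x).contains k || (PySem.Dict.mk y).contains k) = true := by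
    intro k hk
    rw [hkeys] at hk
    rcases List.mem_append.mp hk with h | h
    · have : (PySem.Dict.mk x).contains k = true := by
        apply (PySem.Dict.contains_iff_mem_keys _ _).mpr
        simpa [PySem.Dict.keys_mk] using h
      simp [this]
    · have : (PySem.Dict.mk y).contains k = true := by
        apply (PySem.Dict.contains_iff_mem_keys _ _).mpr
        simpa [PySem.Dict.keys_mk] using (List.mem_filter.mp h).1
      simp [this]
  simp only [specialMerge]
  rw [pvAfold x y ((PySem.Dict.mk x).update y).keys PySem.Dict.empty hksnd
    (fun k _ => PySem.Dict.contains_empty k) hxory]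
  rw [show (PySem.Dict.empty : PySem.Dict String (List (String × String))).items = [] from rfl,
    List.nil_append, hkeys, List.map_append]
  unfold pvCanon
  congr 1
  · -- x part
    rw [List.map_map]
    apply List.map_congr_left
    intro p hp
    have hcx : (PySem.Dict.mk x).contains p.1 = true := pv_mk_contains_of_mem x p hp
    have hgx : (PySem.Dict.mk x).get? p.1 = some p.2 := pv_mk_get?_mem x hx p hp
    simp only [Function.comp]
    unfold pvG pvApplyY
    cases hcy : (PySem.Dict.mk y).contains p.1
    · have hgy : (PySem.Dict.mk y).get? p.1 = none := by
        apply pv_get?_none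
        intro hmem
        rw [(PySem.Dict.contains_iff_mem_keys _ _).mpr hmem] at hcy
        cases hcy
      rw [hgy, hgx]
      simp [hcx]
    · have hmem : p.1 ∈ (PySem.Dict.mk y).keys := (PySem.Dict.contains_iff_mem_keys _ _).mp hcy
      cases hgy : (PySem.Dict.mk y).get? p.1 with
      | none => exact absurd ((PySem.Dict.get?_eq_none_iff_not_mem_keys _ _).mp hgy) (fun h => h hmem)
      | some b =>
        rw [hgx]
        simp [hcx]
  · -- y part
    have hpred : ∀ q ∈ y, (!(PySem.Set.contains (x.map Prod.fst) (q : String × List (String × String)).1))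
        = !((PySem.Dict.mk x).contains q.1) := by
      intro q _
      have : PySem.Set.contains (x.map Prod.fst) q.1 = (PySem.Dict.mk x).contains q.1 := by
        by_cases hmm : q.1 ∈ x.map Prod.fst
        · rw [(PySem.Set.contains_iff _ _).mpr hmm,
            (PySem.Dict.contains_iff_mem_keys _ _).mpr (by simpa [PySem.Dict.keys_mk] using hmm)]
        · have h1 : PySem.Set.contains (x.map Prod.fst) q.1 = false := by
            cases hcc : PySem.Set.contains (x.map Prod.fst) q.1
            · rfl
            · exact absurd ((PySem.Set.contains_iff _ _).mp hcc) hmm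
          have h2 : (PySem.Dict.mk x).contains q.1 = false :=
            pv_contains_false _ _ (by simpa [PySem.Dict.keys_mk] using hmm)
          rw [h1, h2]
      rw [this]
    rw [pv_filter_map_fst, List.map_map]
    rw [List.filter_congr hpred]
    have hid : List.map ((fun k => (k, pvG x y k)) ∘ Prod.fst)
          (y.filter (fun q => !((PySem.Dict.mk x).contains q.1)))
        = List.map id (y.filter (fun q => !((PySem.Dict.mk x).contains q.1))) := by
      apply List.map_congr_left
      intro q hq
      have hqy : q ∈ y := (List.mem_filter.mp hq).1
      have hqnx : (PySem.Dict.mk x).contains q.1 = false := by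
        have := (List.mem_filter.mp hq).2
        simpa using this
      have hcy : (PySem.Dict.mk y).contains q.1 = true := pv_mk_contains_of_mem y q hqy
      have hgy : (PySem.Dict.mk y).get? q.1 = some q.2 := pv_mk_get?_mem y hy q hqy
      simp only [Function.comp]
      unfold pvG
      rw [hgy]
      simp [hqnx, hcy]
    rw [hid, List.map_id]

-- ===== VERDICT (by name: the statement is the Claim_ definition above) =====
theorem specialMerge_spec : Claim_equal_specialMerge := by
  intro x y _ hpre
  unfold Spec_specialMerge
  rw [specialMerge_A_eq_canon x y hpre, specialMerge_B_eq_canon x y hpre]
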